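-- pv_equiv track=rewrite | github.com/walrus7521/code | toys/misc/py/randwords.py | decorate
-- ===== SOURCE A (Python) =====
-- def decorate(word):
--     deco = []
--     for c in word:
--         if c == 'e':
--             deco += '3'
--         elif c == 'a':
--             deco += '7'
--         else:
--             deco += c
--     deco = "".join(str(x) for x in deco)
--     return deco
-- ===== SOURCE B (Python) =====
-- def decorate(word):
--     return '7'.join('3'.join(word.split('e')).split('a'))
-- ===== Notes on version B (the rewrite author's own statement) =====
-- stated objective: alternative
-- what changed: Instead of a char-by-char accumulator loop with if/elif branches, B splits the string into segments at each target character and rejoins them with the replacement (split/join over a segment list, staged once per target); correct because the replacement characters are never themselves targets.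
import Mathlib
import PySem

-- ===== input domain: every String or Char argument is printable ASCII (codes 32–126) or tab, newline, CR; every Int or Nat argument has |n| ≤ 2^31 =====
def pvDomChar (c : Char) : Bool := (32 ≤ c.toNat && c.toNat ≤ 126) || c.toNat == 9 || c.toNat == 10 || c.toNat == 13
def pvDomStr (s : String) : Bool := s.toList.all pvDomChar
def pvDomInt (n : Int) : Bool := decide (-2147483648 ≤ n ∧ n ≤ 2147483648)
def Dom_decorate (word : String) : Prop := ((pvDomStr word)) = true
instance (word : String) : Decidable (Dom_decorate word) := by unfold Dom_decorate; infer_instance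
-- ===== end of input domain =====

-- B replaces A's char-by-char accumulator loop by a segment-list decomposition:
-- split at 'e' and rejoin with '3', then split at 'a' and rejoin with '7'
-- (correct because '3' and '7' are never substitution targets).

-- ===== PORT A =====
-- A: build deco char by char ("deco += '3'" extends the char list by one char), then
-- join; str(x) on a char is that char, so the join is String.ofList.
def decorate (word : String) : String :=
  String.ofList (word.toList.foldl
    (fun deco c =>
      if c = 'e' then deco ++ ['3']
      else if c = 'a' then deco ++ ['7']
      else deco ++ [c]) [])

-- ===== PORT B =====
-- B: '7'.join('3'.join(word.split('e')).split('a')); split/join ported via the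
-- PySem.Chars forms (splitOn is Python split with a non-empty separator, join is str.join).
def decorate_alt (word : String) : String :=
  String.ofList
    (PySem.Chars.join ['7']
      (PySem.Chars.splitOn
        (PySem.Chars.join ['3'] (PySem.Chars.splitOn word.toList ['e'])) ['a']))

-- ===== PRECONDITION & SPEC =====
def Spec_decorate (word : String) (out : String) : Prop := out = decorate_alt word
instance (word : String) (out : String) : Decidable (Spec_decorate word out) := by unfold Spec_decorate; infer_instance

-- ===== CLAIM (what is proved, stated in full; the proofs are below) =====
def Claim_equal_decorate : Prop := ∀ (word : String), Dom_decorate word → Spec_decorate word (decorate word)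

-- ===== LEMMAS AND PROOFS =====

-- reference single-character split (proof helper only)
def splitChar (o : Char) : List Char → List (List Char)
  | [] => [[]]
  | c :: t => if c = o then [] :: splitChar o t else ((splitChar o t).modifyHead (c :: ·))

theorem splitChar_ne_nil (o : Char) (l : List Char) : splitChar o l ≠ [] := by
  cases l with
  | nil => simp [splitChar]
  | cons c t =>
    simp only [splitChar]
    split_ifs
    · simp
    · cases h : splitChar o t with
      | nil => exact absurd h (splitChar_ne_nil o t)
      | cons a b => simp

theorem splitOn_go_single (o : Char) :
    ∀ (l : List Char) (fuel : Nat) (cur : List Char) (acc : List (List Char)),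
      l.length < fuel →
      PySem.Chars.splitOn.go [o] fuel l cur acc
        = acc.reverse ++ (splitChar o l).modifyHead (cur.reverse ++ ·) := by
  intro l
  induction l with
  | nil =>
      intro fuel cur acc hf
      cases fuel with
      | zero => omega
      | succ fuel => simp [PySem.Chars.splitOn.go, splitChar]
  | cons c t ih =>
      intro fuel cur acc hf
      cases fuel with
      | zero => omega
      | succ fuel =>
        by_cases hc : c = o
        · subst hc
          have hp : [c].isPrefixOf (c :: t) = true := by simp [List.isPrefixOf]
          simp only [PySem.Chars.splitOn.go, hp, if_pos, List.length_cons,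
            List.length_nil, Nat.zero_add, List.drop_succ_cons, List.drop_zero]
          rw [ih fuel [] (cur.reverse :: acc) (by simpa using Nat.lt_of_succ_lt_succ hf)]
          simp only [splitChar, if_pos rfl]
          cases h : splitChar c t with
          | nil => exact absurd h (splitChar_ne_nil c t)
          | cons a b => simp
        · have hp : [o].isPrefixOf (c :: t) = false := by
            simp only [List.isPrefixOf, Bool.and_true, beq_eq_false_iff_ne]
            exact fun h => hc h.symm
          simp only [PySem.Chars.splitOn.go, hp, Bool.false_eq_true, if_false]
          rw [ih fuel (c :: cur) acc (Nat.lt_of_succ_lt_succ hf)]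
          simp only [splitChar, if_neg hc]
          cases h : splitChar o t with
          | nil => exact absurd h (splitChar_ne_nil o t)
          | cons a b => simp

theorem splitOn_single (o : Char) (s : List Char) :
    PySem.Chars.splitOn s [o] = splitChar o s := by
  rw [PySem.Chars.splitOn,
    splitOn_go_single o s (s.length + 1) [] [] (Nat.lt_succ_self _)]
  cases h : splitChar o s with
  | nil => exact absurd h (splitChar_ne_nil o s)
  | cons a b => simp

theorem join_cons_head (n c : Char) (a : List Char) (b : List (List Char)) :
    PySem.Chars.join [n] ((c :: a) :: b) = c :: PySem.Chars.join [n] (a :: b) := by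
  cases b <;> simp [PySem.Chars.join, List.intercalate, List.intersperse]

theorem join_nil_head (n : Char) (a : List Char) (b : List (List Char)) :
    PySem.Chars.join [n] ([] :: a :: b) = n :: PySem.Chars.join [n] (a :: b) := by
  cases b <;> simp [PySem.Chars.join, List.intercalate, List.intersperse]

theorem join_splitChar (o n : Char) (s : List Char) :
    PySem.Chars.join [n] (splitChar o s)
      = s.flatMap (fun c => if c = o then [n] else [c]) := by
  induction s with
  | nil => simp [splitChar, PySem.Chars.join, List.intercalate]
  | cons c t ih =>
    simp only [splitChar]
    cases h : splitChar o t with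
    | nil => exact absurd h (splitChar_ne_nil o t)
    | cons a b =>
      rw [h] at ih
      by_cases hc : c = o
      · subst hc
        rw [if_pos rfl] ; rw [join_nil_head, ih]
        simp
      · rw [if_neg hc]
        simp only [List.modifyHead]
        rw [join_cons_head, ih]
        simp [hc]

theorem join_splitOn (o n : Char) (s : List Char) :
    PySem.Chars.join [n] (PySem.Chars.splitOn s [o])
      = s.flatMap (fun c => if c = o then [n] else [c]) := by
  rw [splitOn_single, join_splitChar]

-- ===== VERDICT (by name: the statement is the Claim_ definition above) =====
theorem decorate_spec : Claim_equal_decorate := by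
  intro word _
  unfold Spec_decorate decorate decorate_alt
  have hfold :
      (fun (deco : List Char) (c : Char) =>
        if c = 'e' then deco ++ ['3']
        else if c = 'a' then deco ++ ['7']
        else deco ++ [c])
      = (fun deco c => deco ++
          (if c = 'e' then ['3'] else if c = 'a' then ['7'] else [c])) := by
    funext deco c; split_ifs <;> rfl
  rw [hfold, PySem.List.foldl_append_eq_flatMap, List.nil_append]
  rw [join_splitOn 'e' '3', join_splitOn 'a' '7', List.flatMap_assoc]
  congr 1
  apply List.flatMap_congr
  intro c _
  by_cases he : c = 'e'
  · simp [he]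
  · by_cases ha : c = 'a' <;> simp [he, ha]
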